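-- pv_equiv track=rewrite | github.com/sihonghuang/pytube | sihong/downloadnovideo.py | channel_type
-- ===== SOURCE A (Python) =====
-- def channel_type(channel_name):
--     category_lists = {
--         'camping': ['HikeCampClimb', 'AtikAilesi', 'BaumOutdoors', 'BahadirKlc',
--                     'tahtarizkyorigma', 'WoodsOfSilence',
--                     'Lonewolfwildcamping', 'ForestFilm', 'XanderBudnick',
--                     'SBWildernessAdventures', 'BrooksandBirches',
--                     'tabi-ie', 'HighlandWoodsman', 'Kampkolik', 'joinmeoutdoors',
--                     '2withnature', 'forestsolitude7448',
--                     'silentfamily', 'jaylegere', '365GunDogadayiz', 'LeavesDiary88'],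
--         'bushwalk': ['HarmenHoek', 'kraigadams'],
--         'wild': ['ThisIsMyAlaska', 'BushcraftAdventure', 'NorwegianXplorer', 'Survivaland',
--                  'MyMethead'],
--         'cityview': ['IntotheWildFilms'],
--         'reallife': ['johnnyharris'],
--         'camera': ['snapsbyfox', 'MannyOrtiz', 'benjhaisch', 'LeeZavitz']
--     }
--
--     for category, channel_list in category_lists.items():
--         if channel_name in channel_list:
--             return category
--
--     return None  # 如果没有匹配项，返回None或其他适当的值
-- ===== SOURCE B (Python) =====
-- def channel_type(channel_name):
--     # flat inverted index: channel -> category, written out once as a literal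
--     channel_categories = {
--         'HikeCampClimb': 'camping',
--         'AtikAilesi': 'camping',
--         'BaumOutdoors': 'camping',
--         'BahadirKlc': 'camping',
--         'tahtarizkyorigma': 'camping',
--         'WoodsOfSilence': 'camping',
--         'Lonewolfwildcamping': 'camping',
--         'ForestFilm': 'camping',
--         'XanderBudnick': 'camping',
--         'SBWildernessAdventures': 'camping',
--         'BrooksandBirches': 'camping',
--         'tabi-ie': 'camping',
--         'HighlandWoodsman': 'camping',
--         'Kampkolik': 'camping',
--         'joinmeoutdoors': 'camping',
--         '2withnature': 'camping',
--         'forestsolitude7448': 'camping',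
--         'silentfamily': 'camping',
--         'jaylegere': 'camping',
--         '365GunDogadayiz': 'camping',
--         'LeavesDiary88': 'camping',
--         'HarmenHoek': 'bushwalk',
--         'kraigadams': 'bushwalk',
--         'ThisIsMyAlaska': 'wild',
--         'BushcraftAdventure': 'wild',
--         'NorwegianXplorer': 'wild',
--         'Survivaland': 'wild',
--         'MyMethead': 'wild',
--         'IntotheWildFilms': 'cityview',
--         'johnnyharris': 'reallife',
--         'snapsbyfox': 'camera',
--         'MannyOrtiz': 'camera',
--         'benjhaisch': 'camera',
--         'LeeZavitz': 'camera',
--     }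
--     return channel_categories.get(channel_name)
-- ===== Notes on version B (the rewrite author's own statement) =====
-- stated objective: idiomatic
-- what changed: B replaces A's loop over category lists with inner membership scans by a single literal inverted dict (channel -> category) answered with one .get lookup.
import Mathlib
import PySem

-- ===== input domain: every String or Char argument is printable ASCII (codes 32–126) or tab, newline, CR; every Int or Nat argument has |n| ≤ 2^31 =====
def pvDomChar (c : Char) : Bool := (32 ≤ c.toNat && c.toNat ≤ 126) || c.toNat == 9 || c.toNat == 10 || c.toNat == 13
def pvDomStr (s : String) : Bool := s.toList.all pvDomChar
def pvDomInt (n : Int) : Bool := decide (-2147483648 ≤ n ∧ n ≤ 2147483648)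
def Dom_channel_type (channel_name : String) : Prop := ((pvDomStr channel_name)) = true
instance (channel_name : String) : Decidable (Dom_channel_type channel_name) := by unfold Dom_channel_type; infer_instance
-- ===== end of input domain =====

-- B replaces A's category loop with inner membership scans by a literal inverted
-- channel->category dict answered with one lookup (idiomatic rewrite, same cost).


-- ===== PORT A =====
-- the dict literal of A, in insertion order (keys distinct, so items() iterates this list)
def pvCategoryLists : List (String × List String) :=
  [("camping", ["HikeCampClimb", "AtikAilesi", "BaumOutdoors", "BahadirKlc",
                "tahtarizkyorigma", "WoodsOfSilence",
                "Lonewolfwildcamping", "ForestFilm", "XanderBudnick",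
                "SBWildernessAdventures", "BrooksandBirches",
                "tabi-ie", "HighlandWoodsman", "Kampkolik", "joinmeoutdoors",
                "2withnature", "forestsolitude7448",
                "silentfamily", "jaylegere", "365GunDogadayiz", "LeavesDiary88"]),
   ("bushwalk", ["HarmenHoek", "kraigadams"]),
   ("wild", ["ThisIsMyAlaska", "BushcraftAdventure", "NorwegianXplorer", "Survivaland",
             "MyMethead"]),
   ("cityview", ["IntotheWildFilms"]),
   ("reallife", ["johnnyharris"]),
   ("camera", ["snapsbyfox", "MannyOrtiz", "benjhaisch", "LeeZavitz"])]

-- the 'for category, channel_list in …: if channel_name in channel_list: return category' loop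
def pvSearch : List (String × List String) → String → Option String
  | [], _ => none
  | (category, channel_list) :: rest, channel_name =>
      if channel_list.contains channel_name then some category
      else pvSearch rest channel_name

def channel_type (channel_name : String) : Option String :=
  pvSearch pvCategoryLists channel_name

-- ===== PORT B =====
-- Source B's literal inverted dict channel -> category, in its insertion order
def pvChannelCategories : PySem.Dict String String :=
  PySem.Dict.mk
  [("HikeCampClimb", "camping"),
   ("AtikAilesi", "camping"),
   ("BaumOutdoors", "camping"),
   ("BahadirKlc", "camping"),
   ("tahtarizkyorigma", "camping"),
   ("WoodsOfSilence", "camping"),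
   ("Lonewolfwildcamping", "camping"),
   ("ForestFilm", "camping"),
   ("XanderBudnick", "camping"),
   ("SBWildernessAdventures", "camping"),
   ("BrooksandBirches", "camping"),
   ("tabi-ie", "camping"),
   ("HighlandWoodsman", "camping"),
   ("Kampkolik", "camping"),
   ("joinmeoutdoors", "camping"),
   ("2withnature", "camping"),
   ("forestsolitude7448", "camping"),
   ("silentfamily", "camping"),
   ("jaylegere", "camping"),
   ("365GunDogadayiz", "camping"),
   ("LeavesDiary88", "camping"),
   ("HarmenHoek", "bushwalk"),
   ("kraigadams", "bushwalk"),
   ("ThisIsMyAlaska", "wild"),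
   ("BushcraftAdventure", "wild"),
   ("NorwegianXplorer", "wild"),
   ("Survivaland", "wild"),
   ("MyMethead", "wild"),
   ("IntotheWildFilms", "cityview"),
   ("johnnyharris", "reallife"),
   ("snapsbyfox", "camera"),
   ("MannyOrtiz", "camera"),
   ("benjhaisch", "camera"),
   ("LeeZavitz", "camera")]

def channel_type_alt (channel_name : String) : Option String :=
  pvChannelCategories.get? channel_name

-- ===== PRECONDITION & SPEC =====
def Spec_channel_type (channel_name : String) (out : Option String) : Prop := out = channel_type_alt channel_name
instance (channel_name : String) (out : Option String) : Decidable (Spec_channel_type channel_name out) := by unfold Spec_channel_type; infer_instance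

-- ===== CLAIM =====
def Claim_equal_channel_type : Prop := ∀ (channel_name : String), Dom_channel_type channel_name → Spec_channel_type channel_name (channel_type channel_name)

-- ===== LEMMAS AND PROOFS =====

-- B's literal pair list is exactly A's category lists flattened in order
lemma pvFlat_eq :
    pvChannelCategories
      = PySem.Dict.mk (pvCategoryLists.flatMap (fun p => p.2.map (fun ch => (ch, p.1)))) := by
  decide

-- first-match lookup in the flattened assoc list of one category block
lemma pvGet_block (c : String) (l : List String) (rest : List (String × String)) (s : String) :
    (PySem.Dict.mk (l.map (fun ch => (ch, c)) ++ rest)).get? s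
      = if l.contains s then some c else (PySem.Dict.mk rest).get? s := by
  induction l with
  | nil => simp
  | cons ch t ih =>
      simp only [List.map_cons, List.cons_append, PySem.Dict.get?_mk_cons, List.contains_cons]
      by_cases h : ch = s
      · subst h; simp
      · have h1 : (ch == s) = false := by simp [h]
        have h2 : (s == ch) = false := by simp [Ne.symm h]
        simp [h1, h2, ih]

-- A's category loop equals first-match lookup in the flattened pair list
lemma pvSearch_eq_lookup (cats : List (String × List String)) (s : String) :
    pvSearch cats s
      = (PySem.Dict.mk (cats.flatMap (fun p => p.2.map (fun ch => (ch, p.1))))).get? s := by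
  induction cats with
  | nil => simp [pvSearch, PySem.Dict.get?]
  | cons p rest ih =>
      obtain ⟨c, l⟩ := p
      simp only [pvSearch, List.flatMap_cons, pvGet_block, ih]

-- ===== VERDICT =====
theorem channel_type_spec : Claim_equal_channel_type := by
  intro s _
  unfold Spec_channel_type channel_type channel_type_alt
  rw [pvFlat_eq, pvSearch_eq_lookup]
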